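-- pv_equiv track=rewrite | github.com/NextStat/nextstat.io | scripts/build_whitepaper.py | _rewrite_mermaid_fences
-- ===== SOURCE A (Python) =====
-- from typing import List, Tuple
--
-- def _rewrite_mermaid_fences(md: str) -> Tuple[str, int]:
--     """Replace ```mermaid fences with a PDF-friendly representation.
--
--     We keep the mermaid source (useful for the PDF reader) but avoid relying on
--     Mermaid rendering during PDF build.
--     """
--     lines = md.splitlines()
--     out: List[str] = []
--     i = 0
--     n_blocks = 0
--     while i < len(lines):
--         line = lines[i]
--         if line.strip().startswith("```mermaid"):
--             n_blocks += 1
--             out.append("Diagram (Mermaid source; rendered in the Markdown version):")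
--             out.append("")
--             out.append("```text")
--             i += 1
--             while i < len(lines) and lines[i].strip() != "```":
--                 out.append(lines[i])
--                 i += 1
--             out.append("```")
--             # Consume closing fence if present.
--             if i < len(lines) and lines[i].strip() == "```":
--                 i += 1
--             continue
--         out.append(line)
--         i += 1
--     return "\n".join(out) + ("\n" if md.endswith("\n") else ""), n_blocks
-- ===== SOURCE B (Python) =====
-- from typing import List, Tuple
--
-- def _rewrite_mermaid_fences(md: str) -> Tuple[str, int]:
--     out: List[str] = []
--     in_mermaid = False
--     n_blocks = 0
--     for line in md.splitlines():
--         if in_mermaid: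
--             if line.strip() == "```":
--                 out.append("```")
--                 in_mermaid = False
--             else:
--                 out.append(line)
--         elif line.strip().startswith("```mermaid"):
--             n_blocks += 1
--             out.append("Diagram (Mermaid source; rendered in the Markdown version):")
--             out.append("")
--             out.append("```text")
--             in_mermaid = True
--         else:
--             out.append(line)
--     if in_mermaid:
--         out.append("```")
--     return "\n".join(out) + ("\n" if md.endswith("\n") else ""), n_blocks
-- ===== Notes on version B (the rewrite author's own statement) =====
-- stated objective: simpler
-- what changed: Replaced the index-driven outer while with a nested inner while (and `continue`) by a single flat for-pass over the lines using an `in_mermaid` boolean state flag.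
import Mathlib
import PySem

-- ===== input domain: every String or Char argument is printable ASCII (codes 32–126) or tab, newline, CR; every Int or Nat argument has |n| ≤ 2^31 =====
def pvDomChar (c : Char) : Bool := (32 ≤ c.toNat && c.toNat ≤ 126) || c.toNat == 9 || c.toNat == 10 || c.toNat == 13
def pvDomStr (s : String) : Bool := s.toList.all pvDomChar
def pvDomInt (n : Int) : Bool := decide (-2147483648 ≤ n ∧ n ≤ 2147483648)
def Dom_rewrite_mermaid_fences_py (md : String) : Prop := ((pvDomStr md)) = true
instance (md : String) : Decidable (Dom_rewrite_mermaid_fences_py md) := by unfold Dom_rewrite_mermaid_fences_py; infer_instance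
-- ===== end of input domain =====

-- B replaces A's index-driven outer while with a nested inner while by one flat
-- pass over the lines carrying an `in_mermaid` boolean flag (simpler, same O(n)).

-- ===== PORT A =====
-- A's inner `while i < len(lines) and lines[i].strip() != "```"` (plus the
-- conditional consumption of the closing fence): returns (body lines, remaining lines).
def pvAtake (lines : List String) : List String × List String :=
  match lines with
  | [] => ([], [])
  | l :: rest =>
    if PySem.Str.strip l == "```" then ([], rest)
    else
      let p := pvAtake rest
      (l :: p.1, p.2)

theorem pvAtake_snd_len (lines : List String) : (pvAtake lines).2.length ≤ lines.length := by
  induction lines with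
  | nil => simp [pvAtake]
  | cons l rest ih =>
    simp only [pvAtake]
    split
    · simp
    · simpa using Nat.le_succ_of_le ih

-- A's outer while over the line index: returns (out lines, n_blocks).
def pvAgo (lines : List String) : List String × Int :=
  match h : lines with
  | [] => ([], 0)
  | l :: rest =>
    if PySem.Str.startswith (PySem.Str.strip l) "```mermaid" then
      let p := pvAtake rest
      let q := pvAgo p.2
      ("Diagram (Mermaid source; rendered in the Markdown version):" :: "" :: "```text" ::
        (p.1 ++ "```" :: q.1), q.2 + 1)
    else
      let q := pvAgo rest
      (l :: q.1, q.2)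
termination_by lines.length
decreasing_by
  · exact Nat.lt_succ_of_le (pvAtake_snd_len rest)
  · simp

def rewrite_mermaid_fences_py (md : String) : String × Int :=
  let r := pvAgo (PySem.Str.splitlines md)
  (String.ofList (PySem.Chars.join "\n".toList (r.1.map String.toList) ++
      (if PySem.Str.endswith md "\n" then ['\n'] else [])), r.2)

-- ===== PORT B =====
-- one step of B's flat for-loop; state = (out, in_mermaid, n_blocks)
def pvBstep (st : List String × Bool × Int) (line : String) : List String × Bool × Int :=
  if st.2.1 then
    if PySem.Str.strip line == "```" then (st.1 ++ ["```"], false, st.2.2)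
    else (st.1 ++ [line], true, st.2.2)
  else if PySem.Str.startswith (PySem.Str.strip line) "```mermaid" then
    (st.1 ++ ["Diagram (Mermaid source; rendered in the Markdown version):", "", "```text"],
      true, st.2.2 + 1)
  else (st.1 ++ [line], false, st.2.2)

def rewrite_mermaid_fences_py_alt (md : String) : String × Int :=
  let st := (PySem.Str.splitlines md).foldl pvBstep ([], false, 0)
  let out := if st.2.1 then st.1 ++ ["```"] else st.1
  (String.ofList (PySem.Chars.join "\n".toList (out.map String.toList) ++
      (if PySem.Str.endswith md "\n" then ['\n'] else [])), st.2.2)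

-- ===== PRECONDITION & SPEC =====
def Spec_rewrite_mermaid_fences_py (md : String) (out : String × Int) : Prop := out = rewrite_mermaid_fences_py_alt md
instance (md : String) (out : String × Int) : Decidable (Spec_rewrite_mermaid_fences_py md out) := by unfold Spec_rewrite_mermaid_fences_py; infer_instance

-- ===== CLAIM (what is proved, stated in full; the proofs are below) =====
def Claim_equal_rewrite_mermaid_fences_py : Prop := ∀ (md : String), Dom_rewrite_mermaid_fences_py md → Spec_rewrite_mermaid_fences_py md (rewrite_mermaid_fences_py md)

-- ===== LEMMAS AND PROOFS =====

-- after B's loop: append the synthetic closing fence if still inside a block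
def pvFin (st : List String × Bool × Int) : List String × Int :=
  (if st.2.1 then st.1 ++ ["```"] else st.1, st.2.2)

-- the loop invariant, for both flag states at once
theorem pvMain (lines : List String) :
    (∀ (acc : List String) (n : Int),
        pvFin (lines.foldl pvBstep (acc, false, n)) =
          (acc ++ (pvAgo lines).1, n + (pvAgo lines).2)) ∧
    (∀ (acc : List String) (n : Int),
        pvFin (lines.foldl pvBstep (acc, true, n)) =
          (acc ++ (pvAtake lines).1 ++ "```" :: (pvAgo (pvAtake lines).2).1,
            n + (pvAgo (pvAtake lines).2).2)) := by
  induction lines with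
  | nil => simp [pvAgo, pvAtake, pvFin]
  | cons l rest ih =>
    constructor
    · intro acc n
      by_cases hm : PySem.Str.startswith (PySem.Str.strip l) "```mermaid" = true
      · simp only [List.foldl_cons, pvBstep, hm, if_true, if_false, Bool.false_eq_true]
        rw [ih.2]
        simp only [pvAgo, hm, if_true, Prod.mk.injEq]
        constructor
        · simp
        · omega
      · simp only [List.foldl_cons, pvBstep, hm, if_false, Bool.false_eq_true]
        rw [ih.1]
        simp only [pvAgo]
        rw [if_neg hm]
        simp
    · intro acc n
      by_cases hc : (PySem.Str.strip l == "```") = true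
      · simp only [List.foldl_cons, pvBstep, hc, if_true]
        rw [ih.1]
        simp [pvAtake, hc]
      · simp only [List.foldl_cons, pvBstep, hc, if_true, if_false, Bool.false_eq_true]
        rw [ih.2]
        simp [pvAtake, hc]

-- ===== VERDICT (by name: the statement is the Claim_ definition above) =====
theorem rewrite_mermaid_fences_py_spec : Claim_equal_rewrite_mermaid_fences_py := by
  intro md _
  unfold Spec_rewrite_mermaid_fences_py rewrite_mermaid_fences_py rewrite_mermaid_fences_py_alt
  have h := (pvMain (PySem.Str.splitlines md)).1 [] 0
  simp only [pvFin] at h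
  have h1 : (if ((PySem.Str.splitlines md).foldl pvBstep ([], false, 0)).2.1 = true then
      ((PySem.Str.splitlines md).foldl pvBstep ([], false, 0)).1 ++ ["```"]
    else ((PySem.Str.splitlines md).foldl pvBstep ([], false, 0)).1) =
      (pvAgo (PySem.Str.splitlines md)).1 := by
    have := congrArg Prod.fst h; simpa using this
  have h2 : ((PySem.Str.splitlines md).foldl pvBstep ([], false, 0)).2.2 =
      (pvAgo (PySem.Str.splitlines md)).2 := by
    have := congrArg Prod.snd h; simpa using this
  simp [h1, h2]
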